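-- pv_equiv track=rewrite | github.com/Krishn1101/Problems-on-Python | Check_String.py | check
-- ===== SOURCE A (Python) =====
-- def check (s):
--     freq = {}
--     for i in s:
--         if i in freq:
--             freq[i] += 1
--         else:
--             freq[i] = 1
--     if len(freq.keys())==1:
--         return True
--     else:
--         return False
-- ===== SOURCE B (Python) =====
-- def check(s):
--     return len(s) > 0 and all(c == s[0] for c in s)
-- ===== Notes on version B (the rewrite author's own statement) =====
-- stated objective: faster
-- what changed: B drops the frequency dictionary entirely: it takes the first character as a reference and checks every character equals it (short-circuiting on the first mismatch), avoiding all hashing/dict maintenance.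
import Mathlib
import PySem

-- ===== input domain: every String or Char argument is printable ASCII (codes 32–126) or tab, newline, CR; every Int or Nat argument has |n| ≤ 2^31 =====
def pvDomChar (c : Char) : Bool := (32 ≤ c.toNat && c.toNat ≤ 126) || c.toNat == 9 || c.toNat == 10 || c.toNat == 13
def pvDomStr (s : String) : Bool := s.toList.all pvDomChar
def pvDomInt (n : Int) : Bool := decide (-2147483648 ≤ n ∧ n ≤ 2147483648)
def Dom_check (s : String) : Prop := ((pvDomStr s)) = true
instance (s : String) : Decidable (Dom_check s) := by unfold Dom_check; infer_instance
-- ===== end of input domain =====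

-- B replaces A's frequency dictionary by a direct reference comparison to the first character (simpler).


-- ===== PORT A =====
def check (s : String) : Bool :=
  let freq := s.toList.foldl (fun d c =>
      if d.contains c then d.insert c ((d.get? c).getD 0 + 1)
      else d.insert c (1 : Int)) PySem.Dict.empty
  if freq.keys.length == 1 then true else false

-- ===== PORT B =====
def check_alt (s : String) : Bool :=
  match s.toList with
  | [] => false
  | h :: _ => s.toList.all (fun c => c == h)

-- ===== PRECONDITION & SPEC =====
def Spec_check (s : String) (out : Bool) : Prop := out = check_alt s
instance (s : String) (out : Bool) : Decidable (Spec_check s out) := by unfold Spec_check; infer_instance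

-- ===== CLAIM (what is proved, stated in full; the proofs are below) =====
def Claim_equal_check : Prop := ∀ (s : String), Dom_check s → Spec_check s (check s)

-- ===== LEMMAS AND PROOFS =====

-- A's counting loop is pointwise the 'insert (getD + 1)' loop, hence Counter.
lemma check_fold_eq_counter (l : List Char) :
    l.foldl (fun d c =>
      if d.contains c then d.insert c ((d.get? c).getD 0 + 1)
      else d.insert c (1 : Int)) PySem.Dict.empty = PySem.Dict.counter l := by
  rw [← PySem.Dict.foldl_insert_getD_add_one_eq_counter]
  apply PySem.List.foldl_congr_mem
  intro d c _
  by_cases h : d.contains c = true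
  · simp [h, PySem.Dict.getD_eq_get?_getD]
  · simp only [Bool.not_eq_true] at h
    simp [h, PySem.Dict.getD_of_not_contains]

-- the key set of l has exactly one element iff l is nonempty and uniform
lemma dedup_length_one (l : List Char) :
    ((PySem.Set.ofList l).length == 1) =
      (match l with | [] => false | h :: _ => l.all (fun c => c == h)) := by
  cases l with
  | nil => decide
  | cons h t =>
    rw [Bool.eq_iff_iff]
    simp only [beq_iff_eq, List.all_eq_true, List.length_eq_one_iff]
    constructor
    · rintro ⟨a, ha⟩ x hx
      have hh : h ∈ PySem.Set.ofList (h :: t) := by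
        rw [PySem.Set.mem_ofList]; exact List.mem_cons_self
      have hxm : x ∈ PySem.Set.ofList (h :: t) := by
        rw [PySem.Set.mem_ofList]; exact hx
      rw [ha] at hh hxm
      simp at hh hxm
      rw [hxm, hh]
    · intro hall
      refine ⟨h, ?_⟩
      have hnd := PySem.Set.nodup_ofList (h :: t)
      have hmem : ∀ x, x ∈ PySem.Set.ofList (h :: t) → x = h := by
        intro x hx
        rw [PySem.Set.mem_ofList] at hx
        exact hall x hx
      have hh : h ∈ PySem.Set.ofList (h :: t) := by
        rw [PySem.Set.mem_ofList]; exact List.mem_cons_self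
      cases hs : PySem.Set.ofList (h :: t) with
      | nil => rw [hs] at hh; cases hh
      | cons a rest =>
        have ha : a = h := hmem a (by rw [hs]; exact List.mem_cons_self)
        subst ha
        rw [hs] at hnd
        have : rest = [] := by
          cases rest with
          | nil => rfl
          | cons b rb =>
            have hb : b = a := hmem b (by rw [hs]; simp)
            exfalso
            rcases List.nodup_cons.mp hnd with ⟨hna, _⟩
            exact hna (by rw [← hb]; simp)
        rw [this]

theorem check_spec : Claim_equal_check := by
  intro s _
  unfold Spec_check check check_alt
  simp only [check_fold_eq_counter, PySem.Dict.keys_counter]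
  have hdl := dedup_length_one s.toList
  cases hl : s.toList with
  | nil => simp
  | cons h t =>
    rw [hl] at hdl
    rw [← hdl]
    split_ifs with hc <;> simp_all
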